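-- pv_equiv track=rewrite | github.com/Gimmingyu/Algorithm-Study | 2019_Kakao_겨울인턴십/hotel_room_assignment.py | solution
-- ===== SOURCE A (Python) =====
-- from collections import defaultdict
--
-- def solution(k, room_number):
--     answer = []
--
--     def is_assigned(number):
--         if number not in upper_room:
--             upper_room[number] = number + 1
--             return number
--
--         room = is_assigned(upper_room[number])
--         upper_room[number] = room + 1
--         return room
--
--     upper_room = defaultdict()
--
--     for i in room_number:
--         room = is_assigned(i)
--         answer.append(room)
--     return answer
-- ===== SOURCE B (Python) =====
-- def solution(k, room_number):
--     upper_room = {}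
--     answer = []
--     for num in room_number:
--         path = []
--         cur = num
--         while cur in upper_room:
--             path.append(cur)
--             cur = upper_room[cur]
--         room = cur
--         upper_room[room] = room + 1
--         for node in path:
--             upper_room[node] = room + 1
--         answer.append(room)
--     return answer
-- ===== Notes on version B (the rewrite author's own statement) =====
-- stated objective: alternative
-- what changed: Replaces the recursive is_assigned (path compression via recursion unwinding) with an iterative pointer-chase that collects the path into a list and then rewrites every visited node to room+1, keeping identical dictionary state without recursion.
import Mathlib
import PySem

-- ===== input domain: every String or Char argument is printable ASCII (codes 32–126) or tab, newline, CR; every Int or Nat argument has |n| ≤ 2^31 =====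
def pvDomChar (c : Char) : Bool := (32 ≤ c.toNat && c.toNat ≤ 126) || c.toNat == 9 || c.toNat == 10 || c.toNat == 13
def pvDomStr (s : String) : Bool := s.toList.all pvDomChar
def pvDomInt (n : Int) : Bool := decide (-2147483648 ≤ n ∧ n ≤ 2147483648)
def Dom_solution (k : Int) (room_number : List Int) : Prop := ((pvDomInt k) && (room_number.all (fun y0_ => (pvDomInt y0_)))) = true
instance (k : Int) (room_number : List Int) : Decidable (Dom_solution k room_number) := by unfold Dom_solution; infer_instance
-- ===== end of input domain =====

-- B replaces A's recursive path compression with an iterative pointer-chase that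
-- records the path and then rewrites every visited node; same return value, same
-- dictionary state (alternative decomposition, not faster).


-- ===== PORT A =====
-- is_assigned, with a fuel guard for termination (fuel = |room_number|+1 is ample:
-- each call adds at most one key and chains are strictly increasing; the fuel-0
-- branch behaves like the base case and is never reached on real runs).
def isAssignedA : Nat → PySem.Dict Int Int → Int → Int × PySem.Dict Int Int
  | 0, d, number => (number, d.insert number (number + 1))
  | f + 1, d, number =>
    if d.contains number = false then
      (number, d.insert number (number + 1))
    else
      let r := isAssignedA f d (d.getD number 0)
      (r.1, r.2.insert number (r.1 + 1))

def solution (k : Int) (room_number : List Int) : List Int :=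
  (room_number.foldl
    (fun (st : List Int × PySem.Dict Int Int) i =>
      let r := isAssignedA (room_number.length + 1) st.2 i
      (st.1 ++ [r.1], r.2))
    ([], PySem.Dict.empty)).1

-- ===== PORT B =====
-- iterative pointer-chase: follow upper_room from cur, collecting the path,
-- until a number not in the dict is reached (same fuel guard as A's recursion).
def collectB : Nat → PySem.Dict Int Int → Int → Int × List Int
  | 0, _, cur => (cur, [])
  | f + 1, d, cur =>
    if d.contains cur then
      let r := collectB f d (d.getD cur 0)
      (r.1, cur :: r.2)
    else (cur, [])

def solution_alt (k : Int) (room_number : List Int) : List Int :=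
  (room_number.foldl
    (fun (st : List Int × PySem.Dict Int Int) num =>
      let rp := collectB (room_number.length + 1) st.2 num
      let room := rp.1
      let d1 := st.2.insert room (room + 1)
      let d2 := rp.2.foldl (fun dd nd => dd.insert nd (room + 1)) d1
      (st.1 ++ [room], d2))
    ([], PySem.Dict.empty)).1

-- ===== PRECONDITION & SPEC =====
def Spec_solution (k : Int) (room_number : List Int) (out : List Int) : Prop := out = solution_alt k room_number
instance (k : Int) (room_number : List Int) (out : List Int) : Decidable (Spec_solution k room_number out) := by unfold Spec_solution; infer_instance

-- ===== CLAIM (what is proved, stated in full; the proofs are below) =====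
def Claim_equal_solution : Prop := ∀ (k : Int) (room_number : List Int), Dom_solution k room_number → Spec_solution k room_number (solution k room_number)

-- ===== LEMMAS AND PROOFS =====

-- Two inserts with the SAME value commute when the second key is already present.
lemma insert_comm_of_contains (d : PySem.Dict Int Int) (k n v : Int)
    (hn : d.contains n = true) :
    (d.insert k v).insert n v = (d.insert n v).insert k v := by
  by_cases hkn : k = n
  · subst hkn; rfl
  · apply PySem.Dict.ext
    by_cases hk : d.contains k = true
    · rw [PySem.Dict.items_insert_of_contains (d.insert k v) v
            (by simp [PySem.Dict.contains_insert, hn]),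
          PySem.Dict.items_insert_of_contains (d.insert n v) v
            (by simp [PySem.Dict.contains_insert, hk]),
          PySem.Dict.items_insert_of_contains d v hk,
          PySem.Dict.items_insert_of_contains d v hn]
      simp only [List.map_map]
      apply List.map_congr_left
      intro p _
      simp only [Function.comp]
      by_cases h1 : p.1 = k <;> by_cases h2 : p.1 = n <;>
        simp [h1, h2, hkn, Ne.symm hkn]
    · rw [PySem.Dict.items_insert_of_contains (d.insert k v) v
            (by simp [PySem.Dict.contains_insert, hn]),
          PySem.Dict.items_insert_of_not_contains d v (by simpa using hk),
          PySem.Dict.items_insert_of_not_contains (d.insert n v) v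
            (by simp [PySem.Dict.contains_insert, hkn, eq_false_of_ne_true hk]),
          PySem.Dict.items_insert_of_contains d v hn]
      simp [hkn]

lemma foldl_insert_comm (p : List Int) (d : PySem.Dict Int Int) (n v : Int)
    (hn : d.contains n = true) :
    (p.foldl (fun dd kk => dd.insert kk v) d).insert n v
      = p.foldl (fun dd kk => dd.insert kk v) (d.insert n v) := by
  induction p generalizing d with
  | nil => rfl
  | cons kk p ih =>
    simp only [List.foldl_cons]
    rw [ih (d.insert kk v) (by simp [PySem.Dict.contains_insert, hn]),
        insert_comm_of_contains d kk n v hn]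

-- A's recursive is_assigned equals B's collect-then-rewrite on every fuel.
lemma isAssignedA_eq_collect (f : Nat) (d : PySem.Dict Int Int) (n : Int) :
    isAssignedA f d n
      = ((collectB f d n).1,
         (collectB f d n).2.foldl
           (fun dd kk => dd.insert kk ((collectB f d n).1 + 1))
           (d.insert (collectB f d n).1 ((collectB f d n).1 + 1))) := by
  induction f generalizing d n with
  | zero => simp [isAssignedA, collectB]
  | succ f ih =>
    by_cases h : d.contains n = true
    · simp only [isAssignedA, collectB, h, if_true, Bool.true_eq_false, if_false]
      rw [ih d (d.getD n 0)]
      simp only [List.foldl_cons]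
      rw [foldl_insert_comm _ _ n _ (by
        simp [PySem.Dict.contains_insert, h])]
    · simp [isAssignedA, collectB, h]

-- ===== VERDICT (by name: the statement is the Claim_ definition above) =====
theorem solution_spec : Claim_equal_solution := by
  intro k room_number _
  unfold Spec_solution solution solution_alt
  congr 1
  apply List.foldl_ext
  intro st i _
  rw [isAssignedA_eq_collect]
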